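-- pv_equiv track=rewrite | github.com/Ben2pop/SoftScores-Heroku | website/views/team_dashboard.py | get_answers_per_question
-- ===== SOURCE A (Python) =====
-- def get_answers_per_question(answer_list, numb_questions):
--     answer_per_question = []
--     for number in range(0, numb_questions):
--         temp_array = []
--         for val in answer_list:
--             answer_value = val[number]
--             temp_array.append(answer_value)
--         answer_per_question.append(temp_array)
--     return answer_per_question
-- ===== SOURCE B (Python) =====
-- def get_answers_per_question(answer_list, numb_questions):
--     # Scatter transpose: one pass over the rows, maintaining all question
--     # buckets at once instead of building one column per outer iteration.
--     answer_per_question = [[] for _ in range(numb_questions)]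
--     for val in answer_list:
--         answer_per_question = [bucket + [val[i]]
--                                for i, bucket in enumerate(answer_per_question)]
--     return answer_per_question
-- ===== Notes on version B (the rewrite author's own statement) =====
-- stated objective: alternative
-- what changed: Loop nesting is interchanged: instead of building one column at a time (outer loop over questions, inner scan of all rows), B makes a single pass over the rows, extending all pre-allocated per-question buckets simultaneously.
import Mathlib
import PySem

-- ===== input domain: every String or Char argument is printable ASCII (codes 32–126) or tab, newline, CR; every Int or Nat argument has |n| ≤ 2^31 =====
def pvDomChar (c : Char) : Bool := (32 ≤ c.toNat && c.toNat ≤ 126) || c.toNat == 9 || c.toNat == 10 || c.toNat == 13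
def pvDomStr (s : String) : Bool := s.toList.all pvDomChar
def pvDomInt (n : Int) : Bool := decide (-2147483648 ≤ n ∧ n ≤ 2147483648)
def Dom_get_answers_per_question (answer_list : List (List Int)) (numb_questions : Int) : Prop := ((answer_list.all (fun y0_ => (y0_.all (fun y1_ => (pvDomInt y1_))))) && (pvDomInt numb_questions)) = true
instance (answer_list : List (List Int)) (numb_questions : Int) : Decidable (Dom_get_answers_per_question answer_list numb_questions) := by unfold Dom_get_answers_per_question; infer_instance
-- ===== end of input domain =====

-- B interchanges the loop nesting (single pass over rows, maintaining all question buckets at once)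
-- instead of building one column per outer iteration; same cost, different decomposition.


-- ===== PORT A =====
-- val[number]: number ≥ 0 and in range on Pre_, so pyGetD … 0 is exact there (IndexError outside Pre_).
def get_answers_per_question (answer_list : List (List Int)) (numb_questions : Int) : List (List Int) :=
  (PySem.List.pyRange 0 numb_questions 1).foldl
    (fun answer_per_question number =>
      answer_per_question ++
        [answer_list.foldl (fun temp_array val => temp_array ++ [PySem.List.pyGetD val number 0]) []])
    []

-- ===== PORT B =====
-- val[i]: i ≥ 0 from enumerate and in range on Pre_, so pyGetD … 0 is exact there.
def get_answers_per_question_alt (answer_list : List (List Int)) (numb_questions : Int) : List (List Int) :=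
  let buckets : List (List Int) := (PySem.List.pyRange 0 numb_questions 1).map (fun _ => [])
  answer_list.foldl
    (fun answer_per_question val =>
      (PySem.List.enumerate answer_per_question 0).map
        (fun p => p.2 ++ [PySem.List.pyGetD val p.1 0]))
    buckets

-- ===== PRECONDITION & SPEC =====
-- Pre_ excludes exactly the inputs where both Pythons raise IndexError: a positive
-- question count with some row shorter than it.
def Pre_get_answers_per_question (answer_list : List (List Int)) (numb_questions : Int) : Prop :=
  numb_questions ≤ 0 ∨ ∀ row ∈ answer_list, numb_questions ≤ (row.length : Int)
instance (answer_list : List (List Int)) (numb_questions : Int) : Decidable (Pre_get_answers_per_question answer_list numb_questions) := by unfold Pre_get_answers_per_question; infer_instance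
def pvWitness_get_answers_per_question : List (List Int) × Int := ([[1, 2], [3, 4], [5, 6]], 2)
def Spec_get_answers_per_question (answer_list : List (List Int)) (numb_questions : Int) (out : List (List Int)) : Prop := out = get_answers_per_question_alt answer_list numb_questions
instance (answer_list : List (List Int)) (numb_questions : Int) (out : List (List Int)) : Decidable (Spec_get_answers_per_question answer_list numb_questions out) := by unfold Spec_get_answers_per_question; infer_instance

-- ===== CLAIM (what is proved, stated in full; the proofs are below) =====
def Claim_equal_get_answers_per_question : Prop := ∀ (answer_list : List (List Int)) (numb_questions : Int), Dom_get_answers_per_question answer_list numb_questions → Pre_get_answers_per_question answer_list numb_questions → Spec_get_answers_per_question answer_list numb_questions (get_answers_per_question answer_list numb_questions)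

-- ===== LEMMAS AND PROOFS =====

theorem pv_mapIdx_ext {α β : Type} (f g : Nat → α → β) (h : ∀ i a, f i a = g i a) (l : List α) :
    l.mapIdx f = l.mapIdx g := by
  induction l generalizing f g with
  | nil => rfl
  | cons x xs ih => rw [List.mapIdx_cons, List.mapIdx_cons, h, ih _ _ (fun i a => h _ _)]

theorem pv_mapIdx_id {α : Type} (l : List α) : l.mapIdx (fun _ a => a) = l := by
  induction l with
  | nil => rfl
  | cons x xs ih => rw [List.mapIdx_cons, ih]

-- generic: fold that appends one image per element is a map
theorem pv_foldl_append_map {α β : Type} (f : α → β) (l : List α) (init : List β) :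
    l.foldl (fun acc x => acc ++ [f x]) init = init ++ l.map f := by
  induction l generalizing init with
  | nil => simp
  | cons x xs ih => simp [List.foldl_cons, ih, List.append_assoc]

-- A in closed form: one column per question index
theorem pv_A_eq (answer_list : List (List Int)) (numb_questions : Int) :
    get_answers_per_question answer_list numb_questions =
      (PySem.List.pyRange 0 numb_questions 1).map
        (fun number => answer_list.map (fun val => PySem.List.pyGetD val number 0)) := by
  unfold get_answers_per_question
  rw [pv_foldl_append_map]
  simp only [List.nil_append]
  apply List.map_congr_left
  intro number _
  rw [pv_foldl_append_map]
  simp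

-- B's one-row step, as mapIdx
theorem pv_step_eq (bs : List (List Int)) (s : Int) (val : List Int) :
    (PySem.List.enumerate bs s).map (fun p => p.2 ++ [PySem.List.pyGetD val p.1 0]) =
      bs.mapIdx (fun j b => b ++ [PySem.List.pyGetD val (s + j) 0]) := by
  induction bs generalizing s with
  | nil => simp [PySem.List.enumerate_nil]
  | cons b bs ih =>
      rw [PySem.List.enumerate_cons, List.map_cons, List.mapIdx_cons, ih]
      congr 1
      · simp
      · apply pv_mapIdx_ext
        intro i a
        have h : s + ((i + 1 : Nat) : Int) = (s + 1) + (i : Int) := by push_cast; ring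
        rw [h]

-- invariant for B's fold over the rows
theorem pv_B_fold (answer_list : List (List Int)) (bs : List (List Int)) :
    answer_list.foldl
        (fun apq val =>
          (PySem.List.enumerate apq 0).map (fun p => p.2 ++ [PySem.List.pyGetD val p.1 0])) bs =
      bs.mapIdx (fun j b => b ++ answer_list.map (fun val => PySem.List.pyGetD val (j : Int) 0)) := by
  induction answer_list generalizing bs with
  | nil =>
      simp only [List.foldl_nil, List.map_nil, List.append_nil]
      rw [pv_mapIdx_ext (g := fun _ a => a) _ (by intro i a; rfl), pv_mapIdx_id]
  | cons val rest ih =>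
      rw [List.foldl_cons, ih, pv_step_eq]
      rw [List.mapIdx_mapIdx]
      apply pv_mapIdx_ext
      intro i a
      simp [List.append_assoc]

theorem get_answers_per_question_eq_alt (answer_list : List (List Int)) (numb_questions : Int) :
    get_answers_per_question answer_list numb_questions =
      get_answers_per_question_alt answer_list numb_questions := by
  rw [pv_A_eq]
  unfold get_answers_per_question_alt
  rw [pv_B_fold]
  apply List.ext_getElem
  · simp
  · intro k h1 h2
    simp only [List.getElem_map, List.getElem_mapIdx, PySem.List.getElem_pyRange_one]
    simp

-- ===== VERDICT (by name: the statement is the Claim_ definition above) =====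
theorem get_answers_per_question_spec : Claim_equal_get_answers_per_question := by
  intro al n _ _
  unfold Spec_get_answers_per_question
  exact get_answers_per_question_eq_alt al n
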